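-- pv_equiv track=rewrite | github.com/midadodin/project- | 98 - Треугольники.py | count_equal_sides
-- ===== SOURCE A (Python) =====
-- def distance_squared(p1, p2):
--     return (p1[0] - p2[0]) ** 2 + (p1[1] - p2[1]) ** 2
--
-- def count_equal_sides(points):
--     n = len(points)
--     equal_sides_count = 0
--
--     distances = {}
--     for i in range(n):
--         for j in range(i + 1, n):
--             d = distance_squared(points[i], points[j])
--             if d not in distances:
--                 distances[d] = set()
--             distances[d].add((i, j))
--
--     for i in range(n):
--         for j in range(i + 1, n):
--             d = distance_squared(points[i], points[j])
--             for pair in distances[d]: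
--                 if i in pair or j in pair:
--                     continue
--                 equal_sides_count += 1
--
--     return equal_sides_count
-- ===== SOURCE B (Python) =====
-- def distance_squared(p1, p2):
--     return (p1[0] - p2[0]) ** 2 + (p1[1] - p2[1]) ** 2
--
-- def count_equal_sides(points):
--     n = len(points)
--     cnt = {}   # squared distance -> number of segments with that length
--     vcnt = {}  # (vertex index, squared distance) -> number of such segments touching the vertex
--     for i in range(n):
--         for j in range(i + 1, n):
--             d = distance_squared(points[i], points[j])
--             cnt[d] = cnt.get(d, 0) + 1
--             vcnt[(i, d)] = vcnt.get((i, d), 0) + 1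
--             vcnt[(j, d)] = vcnt.get((j, d), 0) + 1
--
--     total = 0
--     for i in range(n):
--         for j in range(i + 1, n):
--             d = distance_squared(points[i], points[j])
--             # disjoint same-length partners = all same-length - those touching i - those touching j
--             # (the segment (i, j) itself is subtracted twice, hence the +1)
--             total += cnt[d] - vcnt[(i, d)] - vcnt[(j, d)] + 1
--     return total
-- ===== Notes on version B (the rewrite author's own statement) =====
-- stated objective: alternative
-- what changed: A stores, per squared length, the set of segments and re-scans that whole set for every pair; B instead builds two counters (segments per squared length, and per (endpoint, squared length)) and answers each pair by inclusion-exclusion arithmetic on counter lookups, removing the inner scan over the group.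
import Mathlib
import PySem

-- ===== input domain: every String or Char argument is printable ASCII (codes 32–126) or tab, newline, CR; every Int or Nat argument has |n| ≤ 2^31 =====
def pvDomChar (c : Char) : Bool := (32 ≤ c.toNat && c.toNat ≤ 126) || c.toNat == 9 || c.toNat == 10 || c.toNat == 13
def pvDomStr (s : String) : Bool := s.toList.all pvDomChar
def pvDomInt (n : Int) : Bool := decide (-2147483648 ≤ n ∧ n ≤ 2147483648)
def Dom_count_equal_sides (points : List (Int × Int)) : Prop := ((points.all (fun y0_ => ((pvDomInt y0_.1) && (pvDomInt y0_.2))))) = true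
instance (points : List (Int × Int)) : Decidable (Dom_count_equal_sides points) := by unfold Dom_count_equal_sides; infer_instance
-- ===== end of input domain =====

-- B replaces A's inner scan over the stored set of equal-length segments by two counters
-- (per squared length, and per (vertex, squared length)) combined by inclusion-exclusion per pair.

-- ===== PORT A =====
-- helper distance_squared (shared module context of A and B)
def distance_squared (p1 p2 : Int × Int) : Int :=
  (p1.1 - p2.1) ^ 2 + (p1.2 - p2.2) ^ 2

def count_equal_sides (points : List (Int × Int)) : Int :=
  let n : Int := PySem.List.len points
  let equal_sides_count : Int := 0
  -- first double loop: distances[d] = set of index pairs (i, j) at squared distance d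
  let distances : PySem.Dict Int (PySem.Set (Int × Int)) :=
    (PySem.List.pyRange 0 n 1).foldl (fun dct i =>
      (PySem.List.pyRange (i + 1) n 1).foldl (fun dct j =>
        let d := distance_squared (PySem.List.pyGetD points i (0, 0)) (PySem.List.pyGetD points j (0, 0))
        let dct := if ¬ dct.contains d then dct.insert d PySem.Set.empty else dct
        dct.modify d PySem.Set.empty (fun st => PySem.Set.add st (i, j))) dct)
      PySem.Dict.empty
  -- second double loop: for each pair, scan distances[d] (key always present: (i, j) itself was added)
  let equal_sides_count :=
    (PySem.List.pyRange 0 n 1).foldl (fun acc i =>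
      (PySem.List.pyRange (i + 1) n 1).foldl (fun acc j =>
        let d := distance_squared (PySem.List.pyGetD points i (0, 0)) (PySem.List.pyGetD points j (0, 0))
        (distances.getD d PySem.Set.empty).foldl (fun acc pair =>
          if pair.1 == i || pair.2 == i || pair.1 == j || pair.2 == j then acc else acc + 1) acc) acc)
      equal_sides_count
  equal_sides_count

-- ===== PORT B =====
def count_equal_sides_alt (points : List (Int × Int)) : Int :=
  let n : Int := PySem.List.len points
  -- one double loop building both counters: cnt[d], vcnt[(v, d)]
  let cv : PySem.Dict Int Int × PySem.Dict (Int × Int) Int :=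
    (PySem.List.pyRange 0 n 1).foldl (fun st i =>
      (PySem.List.pyRange (i + 1) n 1).foldl (fun st j =>
        let d := distance_squared (PySem.List.pyGetD points i (0, 0)) (PySem.List.pyGetD points j (0, 0))
        let cnt := st.1.insert d (st.1.getD d 0 + 1)
        let vcnt := st.2.insert (i, d) (st.2.getD (i, d) 0 + 1)
        let vcnt := vcnt.insert (j, d) (vcnt.getD (j, d) 0 + 1)
        (cnt, vcnt)) st)
      (PySem.Dict.empty, PySem.Dict.empty)
  let cnt := cv.1
  let vcnt := cv.2
  -- second double loop: counter arithmetic per pair (keys always present)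
  let total : Int := 0
  let total :=
    (PySem.List.pyRange 0 n 1).foldl (fun acc i =>
      (PySem.List.pyRange (i + 1) n 1).foldl (fun acc j =>
        let d := distance_squared (PySem.List.pyGetD points i (0, 0)) (PySem.List.pyGetD points j (0, 0))
        acc + (cnt.getD d 0 - vcnt.getD (i, d) 0 - vcnt.getD (j, d) 0 + 1)) acc)
      total
  total

-- ===== PRECONDITION & SPEC =====
def Spec_count_equal_sides (points : List (Int × Int)) (out : Int) : Prop := out = count_equal_sides_alt points
instance (points : List (Int × Int)) (out : Int) : Decidable (Spec_count_equal_sides points out) := by unfold Spec_count_equal_sides; infer_instance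

-- ===== CLAIM (what is proved, stated in full; the proofs are below) =====
def Claim_equal_count_equal_sides : Prop := ∀ (points : List (Int × Int)), Dom_count_equal_sides points → Spec_count_equal_sides points (count_equal_sides points)

-- ===== LEMMAS AND PROOFS =====

/-- the squared distance of the segment given by an index pair -/
def pvKey (points : List (Int × Int)) (s : Int × Int) : Int :=
  distance_squared (PySem.List.pyGetD points s.1 (0, 0)) (PySem.List.pyGetD points s.2 (0, 0))

/-- the list of index pairs (i, j), 0 ≤ i < j < n, visited by the double loops -/
def pvPairs (n : Int) : List (Int × Int) :=
  (PySem.List.pyRange 0 n 1).flatMap (fun i => (PySem.List.pyRange (i + 1) n 1).map (fun j => (i, j)))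

theorem pv_foldl_nested {α : Type} (n : Int) (f : α → Int → Int → α) (init : α) :
    (PySem.List.pyRange 0 n 1).foldl (fun acc i =>
      (PySem.List.pyRange (i + 1) n 1).foldl (fun acc j => f acc i j) acc) init
    = (pvPairs n).foldl (fun acc s => f acc s.1 s.2) init := by
  unfold pvPairs
  rw [List.foldl_flatMap]
  simp [List.foldl_map]

theorem pv_mem_pvPairs (n : Int) (s : Int × Int) :
    s ∈ pvPairs n ↔ 0 ≤ s.1 ∧ s.1 < s.2 ∧ s.2 < n := by
  obtain ⟨a, b⟩ := s
  simp only [pvPairs, List.mem_flatMap, List.mem_map, PySem.List.mem_pyRange_one, Prod.mk.injEq]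
  constructor
  · rintro ⟨i, ⟨h0, hn⟩, j, ⟨h1, h2⟩, rfl, rfl⟩; omega
  · rintro ⟨h0, h1, h2⟩; exact ⟨a, ⟨h0, by omega⟩, b, ⟨by omega, h2⟩, rfl, rfl⟩

theorem pv_nodup_pvPairs (n : Int) : (pvPairs n).Nodup := by
  unfold pvPairs
  rw [List.nodup_flatMap]
  constructor
  · intro i _
    exact (PySem.List.nodup_pyRange_one _ _).map (fun a b h => by simpa using h)
  · refine (PySem.List.pairwise_lt_pyRange_one 0 n).imp ?_
    intro a b hab x hxa hxb
    simp only [List.mem_map] at hxa hxb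
    obtain ⟨j, _, rfl⟩ := hxa
    obtain ⟨k, _, hk⟩ := hxb
    injection hk with h1 h2
    omega

/-- A's first loop: the set stored at key d collects exactly the pairs at squared distance d. -/
theorem pv_abuild (pts : List (Int × Int)) :
    ∀ (l : List (Int × Int)) (dct : PySem.Dict Int (PySem.Set (Int × Int))) (d : Int),
    (l.foldl (fun dct s =>
        (if ¬ dct.contains (pvKey pts s) then dct.insert (pvKey pts s) PySem.Set.empty else dct).modify
          (pvKey pts s) PySem.Set.empty (fun st => PySem.Set.add st s)) dct).getD d PySem.Set.empty
    = PySem.Set.update (dct.getD d PySem.Set.empty) (l.filter (fun s => pvKey pts s == d)) := by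
  intro l
  induction l with
  | nil => intro dct d; simp [PySem.Set.update_nil]
  | cons s l ih =>
    intro dct d
    rw [List.foldl_cons, ih, List.filter_cons]
    have hsame : ∀ x : Int,
        (if ¬ dct.contains (pvKey pts s) then dct.insert (pvKey pts s) PySem.Set.empty else dct).getD x
          PySem.Set.empty = dct.getD x PySem.Set.empty := by
      intro x
      by_cases hc : dct.contains (pvKey pts s)
      · simp [hc]
      · rw [if_pos (by simp [hc]), PySem.Dict.getD_insert]
        split
        · next hx =>
          subst hx
          exact (PySem.Dict.getD_of_not_contains dct PySem.Set.empty (by simpa using hc)).symm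
        · rfl
    rw [PySem.Dict.getD_modify, hsame, hsame]
    by_cases h : pvKey pts s = d
    · rw [if_pos h.symm, if_pos (by simp [h]), PySem.Set.update_cons, h]
    · rw [if_neg (fun hh => h hh.symm), if_neg (by simp [h])]

/-- B's cnt counter: getD d 0 counts pairs at squared distance d. -/
theorem pv_cnt (pts : List (Int × Int)) (l : List (Int × Int)) (d : Int) :
    (l.foldl (fun c s => c.insert (pvKey pts s) (c.getD (pvKey pts s) 0 + 1)) PySem.Dict.empty).getD d 0
    = (l.countP (fun s => pvKey pts s == d) : Int) := by
  have h1 : (l.map (pvKey pts)).foldl (fun c x => c.insert x (c.getD x 0 + 1))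
      (PySem.Dict.empty : PySem.Dict Int Int)
      = l.foldl (fun c s => c.insert (pvKey pts s) (c.getD (pvKey pts s) 0 + 1)) PySem.Dict.empty := by
    rw [List.foldl_map]
  rw [← h1, PySem.Dict.getD_foldl_insert_add_one, PySem.Dict.getD_empty]
  rw [List.count_eq_countP, List.countP_map]
  simp only [Function.comp_def, zero_add]

/-- B's vcnt counter: getD (v, d) 0 counts endpoint occurrences of v among pairs at distance d. -/
theorem pv_vcnt (pts : List (Int × Int)) (l : List (Int × Int)) (v d : Int) :
    (l.foldl (fun w s =>
        (w.insert (s.1, pvKey pts s) (w.getD (s.1, pvKey pts s) 0 + 1)).insert (s.2, pvKey pts s)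
          ((w.insert (s.1, pvKey pts s) (w.getD (s.1, pvKey pts s) 0 + 1)).getD (s.2, pvKey pts s) 0 + 1))
        PySem.Dict.empty).getD (v, d) 0
    = (l.countP (fun s => (s.1, pvKey pts s) == (v, d)) : Int)
      + (l.countP (fun s => (s.2, pvKey pts s) == (v, d)) : Int) := by
  have hflat : (l.foldl (fun w s =>
        (w.insert (s.1, pvKey pts s) (w.getD (s.1, pvKey pts s) 0 + 1)).insert (s.2, pvKey pts s)
          ((w.insert (s.1, pvKey pts s) (w.getD (s.1, pvKey pts s) 0 + 1)).getD (s.2, pvKey pts s) 0 + 1))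
        (PySem.Dict.empty : PySem.Dict (Int × Int) Int))
      = ((l.flatMap (fun s => [(s.1, pvKey pts s), (s.2, pvKey pts s)])).foldl
          (fun w k => w.insert k (w.getD k 0 + 1)) PySem.Dict.empty) := by
    rw [List.foldl_flatMap]
    rfl
  rw [hflat, PySem.Dict.getD_foldl_insert_add_one, PySem.Dict.getD_empty]
  have hcount : ∀ (l : List (Int × Int)),
      (l.flatMap (fun s => [(s.1, pvKey pts s), (s.2, pvKey pts s)])).count (v, d)
      = l.countP (fun s => (s.1, pvKey pts s) == (v, d)) + l.countP (fun s => (s.2, pvKey pts s) == (v, d)) := by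
    intro l
    induction l with
    | nil => simp
    | cons t l ih =>
      rw [List.flatMap_cons, List.count_append, ih, List.countP_cons, List.countP_cons]
      simp [List.count_cons]
      omega
  rw [hcount]
  push_cast
  ring

/-- A's inner scan is a countP. -/
theorem pv_scan (i j : Int) (S : List (Int × Int)) (acc : Int) :
    S.foldl (fun acc pair =>
        if pair.1 == i || pair.2 == i || pair.1 == j || pair.2 == j then acc else acc + 1) acc
    = acc + (S.countP (fun pair => !(pair.1 == i || pair.2 == i || pair.1 == j || pair.2 == j)) : Int) := by
  induction S generalizing acc with
  | nil => simp
  | cons t S ih =>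
    rw [List.foldl_cons, List.countP_cons, ih]
    cases t.1 == i || t.2 == i || t.1 == j || t.2 == j
    · simp
      ring
    · simp

/-- inclusion–exclusion per pair (i, j): among same-distance pairs, those avoiding i and j. -/
theorem pv_ie (pts : List (Int × Int)) (i j : Int) (hij : i < j)
    (L : List (Int × Int)) (hL : ∀ t ∈ L, t.1 < t.2) :
    (L.countP (fun t => !(t.1 == i || t.2 == i || t.1 == j || t.2 == j) && (pvKey pts t == pvKey pts (i, j))) : Int)
    = (L.countP (fun t => pvKey pts t == pvKey pts (i, j)) : Int)
      - ((L.countP (fun t => (t.1, pvKey pts t) == (i, pvKey pts (i, j))) : Int)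
          + (L.countP (fun t => (t.2, pvKey pts t) == (i, pvKey pts (i, j))) : Int))
      - ((L.countP (fun t => (t.1, pvKey pts t) == (j, pvKey pts (i, j))) : Int)
          + (L.countP (fun t => (t.2, pvKey pts t) == (j, pvKey pts (i, j))) : Int))
      + (L.count (i, j) : Int) := by
  induction L with
  | nil => simp
  | cons t L ih =>
    have ht : t.1 < t.2 := hL t (List.mem_cons_self ..)
    have ihh := ih (fun u hu => hL u (List.mem_cons_of_mem _ hu))
    obtain ⟨a, b⟩ := t
    simp only [List.countP_cons, List.count_cons, Bool.and_eq_true,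
      Bool.not_eq_eq_eq_not, Bool.not_true, Bool.or_eq_false_iff, beq_iff_eq, beq_eq_false_iff_ne,
      ne_eq, Prod.mk.injEq] at *
    push_cast
    by_cases hab : a = i ∧ b = j
    · obtain ⟨rfl, rfl⟩ := hab
      split_ifs <;> omega
    · split_ifs <;> omega

-- ===== VERDICT (by name: the statement is the Claim_ definition above) =====
theorem count_equal_sides_spec : Claim_equal_count_equal_sides := by
  intro points _
  show count_equal_sides points = count_equal_sides_alt points
  have hk : ∀ i j : Int,
      distance_squared (PySem.List.pyGetD points i (0, 0)) (PySem.List.pyGetD points j (0, 0))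
      = pvKey points (i, j) := fun _ _ => rfl
  unfold count_equal_sides count_equal_sides_alt
  simp only [hk]
  rw [pv_foldl_nested, pv_foldl_nested, pv_foldl_nested, pv_foldl_nested]
  simp only [Prod.mk.eta]
  set n : Int := PySem.List.len points with hn
  simp only [pv_abuild, PySem.Dict.getD_empty]
  have hset : ∀ dk : Int,
      PySem.Set.update PySem.Set.empty (List.filter (fun t => pvKey points t == dk) (pvPairs n))
      = List.filter (fun t => pvKey points t == dk) (pvPairs n) := by
    intro dk
    rw [show (PySem.Set.empty : PySem.Set (Int × Int)) = [] from rfl, PySem.Set.update_nil_left,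
      PySem.Set.ofList_eq_self_of_nodup _ ((pv_nodup_pvPairs n).filter _)]
  simp only [hset, pv_scan, List.countP_filter]
  have hsplit := PySem.List.foldl_prod_mk
    (f := fun (c : PySem.Dict Int Int) (s : Int × Int) =>
      c.insert (pvKey points s) (c.getD (pvKey points s) 0 + 1))
    (g := fun (w : PySem.Dict (Int × Int) Int) (s : Int × Int) =>
      (w.insert (s.1, pvKey points s) (w.getD (s.1, pvKey points s) 0 + 1)).insert (s.2, pvKey points s)
        ((w.insert (s.1, pvKey points s) (w.getD (s.1, pvKey points s) 0 + 1)).getD (s.2, pvKey points s) 0 + 1))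
    (pvPairs n) PySem.Dict.empty PySem.Dict.empty
  rw [hsplit]
  simp only [pv_cnt, pv_vcnt]
  rw [PySem.List.foldl_add, PySem.List.foldl_add]
  congr 1
  congr 1
  apply List.map_congr_left
  intro s hs
  obtain ⟨i, j⟩ := s
  have hmem := (pv_mem_pvPairs n (i, j)).mp hs
  have hij : i < j := hmem.2.1
  have hL : ∀ t ∈ pvPairs n, t.1 < t.2 := fun t ht => ((pv_mem_pvPairs n t).mp ht).2.1
  have hie := pv_ie points i j hij (pvPairs n) hL
  have hone : (pvPairs n).count (i, j) = 1 :=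
    List.count_eq_one_of_mem (pv_nodup_pvPairs n) hs
  rw [hone] at hie
  omega
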